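-- pv_equiv track=rewrite | github.com/blueoxss/JOILang-Server | gpt_mg/version0_15_update20260413/scripts/run_model_suite_benchmark.py | _primary_error_type
-- ===== SOURCE A (Python) =====
-- def _primary_error_type(error_types: list[str]) -> str:
--     priority = [
--         "cuda_oom",
--         "worker_crash",
--         "incompatible_runtime",
--         "gated_model",
--         "missing_cache",
--         "cpu_fallback_timeout",
--         "invalid_json",
--         "local_llm_error",
--     ]
--     normalized = [str(item).strip() for item in error_types if str(item).strip()]
--     if not normalized:
--         return ""
--     for candidate in priority:
--         if candidate in normalized:
--             return candidate
--     return normalized[0]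
-- ===== SOURCE B (Python) =====
-- def _primary_error_type(error_types: list[str]) -> str:
--     rank = {
--         "cuda_oom": 0,
--         "worker_crash": 1,
--         "incompatible_runtime": 2,
--         "gated_model": 3,
--         "missing_cache": 4,
--         "cpu_fallback_timeout": 5,
--         "invalid_json": 6,
--         "local_llm_error": 7,
--     }
--     normalized = [str(item).strip() for item in error_types if str(item).strip()]
--     if not normalized:
--         return ""
--     best = None
--     best_rank = 8
--     for item in normalized:
--         r = rank.get(item)
--         if r is not None and r < best_rank:
--             best = item
--             best_rank = r
--     return best if best is not None else normalized[0]
-- ===== Notes on version B (the rewrite author's own statement) =====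
-- stated objective: alternative
-- what changed: Replaces the 8 repeated membership scans over normalized (one per priority string) with a rank dictionary and a single pass over normalized keeping the element of smallest rank.
import Mathlib
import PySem

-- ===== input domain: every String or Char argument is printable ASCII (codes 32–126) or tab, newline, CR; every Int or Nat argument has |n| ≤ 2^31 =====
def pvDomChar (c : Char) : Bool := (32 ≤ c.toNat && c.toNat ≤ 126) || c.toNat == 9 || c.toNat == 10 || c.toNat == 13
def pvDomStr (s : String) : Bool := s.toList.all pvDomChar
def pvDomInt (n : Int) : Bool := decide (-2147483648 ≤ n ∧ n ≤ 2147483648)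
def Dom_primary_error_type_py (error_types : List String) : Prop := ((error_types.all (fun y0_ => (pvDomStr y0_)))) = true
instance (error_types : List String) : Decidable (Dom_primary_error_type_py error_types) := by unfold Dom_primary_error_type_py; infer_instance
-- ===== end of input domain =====

-- B replaces A's repeated membership scans over `normalized` (one scan per priority string)
-- by a rank dictionary and a single pass over `normalized` keeping the element of smallest
-- rank (objective: alternative).

-- ===== PORT A =====
def pvPriority : List String :=
  ["cuda_oom", "worker_crash", "incompatible_runtime", "gated_model",
   "missing_cache", "cpu_fallback_timeout", "invalid_json", "local_llm_error"]

def primary_error_type_py (error_types : List String) : String :=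
  let normalized := (error_types.map (fun item => PySem.Str.strip item)).filter (fun s => s ≠ "")
  if normalized = [] then ""
  else
    -- for candidate in priority: if candidate in normalized: return candidate
    match pvPriority.find? (fun c => normalized.contains c) with
    | some c => c
    | none => normalized.headD ""

-- ===== PORT B =====
def pvRank : PySem.Dict String Int :=
  PySem.Dict.mk
    [("cuda_oom", 0), ("worker_crash", 1), ("incompatible_runtime", 2), ("gated_model", 3),
     ("missing_cache", 4), ("cpu_fallback_timeout", 5), ("invalid_json", 6), ("local_llm_error", 7)]

-- one step of B's single pass: keep the element with the strictly smallest rank seen so far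
def pvStep (acc : Option String × Int) (item : String) : Option String × Int :=
  match PySem.Dict.get? pvRank item with
  | some r => if r < acc.2 then (some item, r) else acc
  | none => acc

def primary_error_type_py_alt (error_types : List String) : String :=
  let normalized := (error_types.map (fun item => PySem.Str.strip item)).filter (fun s => s ≠ "")
  if normalized = [] then ""
  else
    match (normalized.foldl pvStep (none, 8)).1 with
    | some b => b
    | none => normalized.headD ""

-- ===== PRECONDITION & SPEC =====
def Spec_primary_error_type_py (error_types : List String) (out : String) : Prop := out = primary_error_type_py_alt error_types
instance (error_types : List String) (out : String) : Decidable (Spec_primary_error_type_py error_types out) := by unfold Spec_primary_error_type_py; infer_instance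

-- ===== CLAIM (what is proved, stated in full; the proofs are below) =====
def Claim_equal_primary_error_type_py : Prop := ∀ (error_types : List String), Dom_primary_error_type_py error_types → Spec_primary_error_type_py error_types (primary_error_type_py error_types)

-- ===== LEMMAS AND PROOFS =====

-- rank value of a string: its dict rank if present, else 8
def pvMr (s : String) : Int := (PySem.Dict.get? pvRank s).getD 8

-- minimum rank over a list (8 if no element is ranked)
def pvMinMr (L : List String) : Int := L.foldr (fun x m => min (pvMr x) m) 8

-- the priority string of a given rank
def pvPr (i : Int) : String :=
  if i = 0 then "cuda_oom" else if i = 1 then "worker_crash"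
  else if i = 2 then "incompatible_runtime" else if i = 3 then "gated_model"
  else if i = 4 then "missing_cache" else if i = 5 then "cpu_fallback_timeout"
  else if i = 6 then "invalid_json" else if i = 7 then "local_llm_error" else ""

theorem pvMr_lt8_pr (x : String) (h : pvMr x < 8) : x = pvPr (pvMr x) ∧ 0 ≤ pvMr x := by
  by_cases h0 : x = "cuda_oom"; · subst h0; constructor <;> decide
  by_cases h1 : x = "worker_crash"; · subst h1; constructor <;> decide
  by_cases h2 : x = "incompatible_runtime"; · subst h2; constructor <;> decide
  by_cases h3 : x = "gated_model"; · subst h3; constructor <;> decide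
  by_cases h4 : x = "missing_cache"; · subst h4; constructor <;> decide
  by_cases h5 : x = "cpu_fallback_timeout"; · subst h5; constructor <;> decide
  by_cases h6 : x = "invalid_json"; · subst h6; constructor <;> decide
  by_cases h7 : x = "local_llm_error"; · subst h7; constructor <;> decide
  exfalso
  have hn : PySem.Dict.get? pvRank x = none := by
    simp only [pvRank, PySem.Dict.get?_mk_cons, beq_iff_eq]
    rw [if_neg (fun hc => h0 hc.symm), if_neg (fun hc => h1 hc.symm),
        if_neg (fun hc => h2 hc.symm), if_neg (fun hc => h3 hc.symm),
        if_neg (fun hc => h4 hc.symm), if_neg (fun hc => h5 hc.symm),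
        if_neg (fun hc => h6 hc.symm), if_neg (fun hc => h7 hc.symm)]
    rfl
  unfold pvMr at h
  rw [hn] at h
  simp at h

theorem pvMr_le8 (x : String) : pvMr x ≤ 8 := by
  cases hg : PySem.Dict.get? pvRank x with
  | none => simp [pvMr, hg]
  | some r =>
    have h : pvMr x = r := by simp [pvMr, hg]
    by_cases h8 : pvMr x < 8
    · omega
    · -- every value in the dict is < 8: check by deciding the dict lookup
      exfalso
      revert hg
      simp only [pvRank, PySem.Dict.get?_mk_cons, beq_iff_eq]
      split_ifs <;> intro hg <;> first
        | (injection hg with hv; omega)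
        | simp [PySem.Dict.get?] at hg

theorem pvMinMr_le8 (L : List String) : pvMinMr L ≤ 8 := by
  induction L with
  | nil => simp [pvMinMr]
  | cons x L ih => simp only [pvMinMr, List.foldr] at *; omega

theorem pvMr_nonneg (x : String) : 0 ≤ pvMr x := by
  have hle := pvMr_le8 x
  by_cases h : pvMr x < 8
  · exact (pvMr_lt8_pr x h).2
  · omega

theorem pvMinMr_nonneg (L : List String) : 0 ≤ pvMinMr L := by
  induction L with
  | nil => simp [pvMinMr]
  | cons x L ih =>
    have := pvMr_nonneg x
    have hmin : pvMinMr (x :: L) = min (pvMr x) (pvMinMr L) := rfl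
    rw [hmin]; omega

theorem pvStep_eq (acc : Option String × Int) (item : String) (h : acc.2 ≤ 8) :
    pvStep acc item = if pvMr item < acc.2 then (some item, pvMr item) else acc := by
  unfold pvStep pvMr
  cases hg : PySem.Dict.get? pvRank item with
  | none => simp only [Option.getD_none]; rw [if_neg (by omega)]
  | some r => simp

-- full characterisation of B's fold
theorem pvFold_eq (L : List String) (b : Option String) (br : Int) (hbr : br ≤ 8)
    (hb : br < 8 → b = some (pvPr br)) :
    L.foldl pvStep (b, br) =
      if pvMinMr L < br then (some (pvPr (pvMinMr L)), pvMinMr L) else (b, br) := by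
  induction L generalizing b br with
  | nil =>
    simp only [List.foldl]
    rw [if_neg (by simp [pvMinMr]; omega)]
  | cons x L ih =>
    have hmx := pvMr_le8 x
    have hmL := pvMinMr_le8 L
    have hmin : pvMinMr (x :: L) = min (pvMr x) (pvMinMr L) := rfl
    simp only [List.foldl]
    rw [pvStep_eq _ _ hbr]
    by_cases hx : pvMr x < br
    · simp only [hx, if_true]
      have hx8 : pvMr x < 8 := by omega
      obtain ⟨hpr, _⟩ := pvMr_lt8_pr x hx8
      rw [ih (some x) (pvMr x) (by omega) (fun _ => by rw [← hpr])]
      by_cases hL : pvMinMr L < pvMr x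
      · have h1 : pvMinMr (x :: L) = pvMinMr L := by rw [hmin]; omega
        rw [if_pos hL, h1, if_pos (by omega)]
      · have h1 : pvMinMr (x :: L) = pvMr x := by rw [hmin]; omega
        rw [if_neg hL, h1, if_pos hx, ← hpr]
    · simp only [hx, if_false]
      rw [ih b br hbr hb]
      by_cases hL : pvMinMr L < br
      · have h2 : pvMinMr (x :: L) = pvMinMr L := by rw [hmin]; omega
        rw [if_pos hL, h2, if_pos (by omega)]
      · rw [if_neg hL, if_neg (by rw [hmin]; omega)]

-- membership bounds the minimum
theorem mem_imp_minle (L : List String) (x : String) (hx : x ∈ L) : pvMinMr L ≤ pvMr x := by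
  induction L with
  | nil => cases hx
  | cons y L ih =>
    have hmin : pvMinMr (y :: L) = min (pvMr y) (pvMinMr L) := rfl
    rcases List.mem_cons.mp hx with rfl | hx
    · rw [hmin]; omega
    · have := ih hx; rw [hmin]; omega

-- the minimum is attained when < 8
theorem min_attained (L : List String) (h : pvMinMr L < 8) : pvPr (pvMinMr L) ∈ L := by
  induction L with
  | nil => simp [pvMinMr] at h
  | cons x L ih =>
    have hmin : pvMinMr (x :: L) = min (pvMr x) (pvMinMr L) := rfl
    have hmL := pvMinMr_le8 L
    by_cases hL : pvMinMr L ≤ pvMr x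
    · have h1 : pvMinMr (x :: L) = pvMinMr L := by rw [hmin]; omega
      rw [h1]
      exact List.mem_cons_of_mem _ (ih (by rw [h1] at h; omega))
    · have h1 : pvMinMr (x :: L) = pvMr x := by rw [hmin]; omega
      rw [h1]
      obtain ⟨hpr, _⟩ := pvMr_lt8_pr x (by rw [h1] at h; omega)
      rw [← hpr]
      exact List.mem_cons_self

theorem pvMr_pr (j : Int) (h0 : 0 ≤ j) (h8 : j < 8) : pvMr (pvPr j) = j := by
  have : j = 0 ∨ j = 1 ∨ j = 2 ∨ j = 3 ∨ j = 4 ∨ j = 5 ∨ j = 6 ∨ j = 7 := by omega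
  rcases this with rfl|rfl|rfl|rfl|rfl|rfl|rfl|rfl <;> decide

theorem minmr_eq_of (N : List String) (k : Int) (h0 : 0 ≤ k) (h8 : k < 8)
    (hmem : pvPr k ∈ N) (hno : ∀ j : Int, 0 ≤ j → j < k → pvPr j ∉ N) :
    pvMinMr N = k := by
  have h1 : pvMinMr N ≤ k := by
    have := mem_imp_minle N _ hmem
    rwa [pvMr_pr k h0 h8] at this
  by_contra hne
  have h2 : pvMinMr N < k := by omega
  have h3 := min_attained N (by omega)
  exact hno _ (pvMinMr_nonneg N) h2 h3

theorem minmr_eq8_of (N : List String) (hno : ∀ j : Int, 0 ≤ j → j < 8 → pvPr j ∉ N) :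
    pvMinMr N = 8 := by
  have hle := pvMinMr_le8 N
  by_contra hne
  have h2 : pvMinMr N < 8 := by omega
  exact hno _ (pvMinMr_nonneg N) h2 (min_attained N h2)

theorem find_eq (N : List String) :
    pvPriority.find? (fun c => N.contains c) =
      if pvMinMr N < 8 then some (pvPr (pvMinMr N)) else none := by
  by_cases c0 : N.contains "cuda_oom" = true
  · have hm := minmr_eq_of N 0 (by norm_num) (by norm_num) (by simpa using c0)
      (by intro j hj0 hj; omega)
    have mk : "cuda_oom" ∈ N := by simpa using c0
    rw [hm]
    simp [pvPriority, List.find?, mk, pvPr]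
  by_cases c1 : N.contains "worker_crash" = true
  · have hm := minmr_eq_of N 1 (by norm_num) (by norm_num) (by simpa using c1)
      (by
      intro j hj0 hj
      have hj' : j = 0 := by omega
      rcases hj' with rfl
      · intro hmem; exact c0 (by simpa [pvPr] using hmem))
    have mk : "worker_crash" ∈ N := by simpa using c1
    have m0 : ¬ "cuda_oom" ∈ N := by simpa using c0
    rw [hm]
    simp [pvPriority, List.find?, mk, m0, pvPr]
  by_cases c2 : N.contains "incompatible_runtime" = true
  · have hm := minmr_eq_of N 2 (by norm_num) (by norm_num) (by simpa using c2)
      (by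
      intro j hj0 hj
      have hj' : j = 0 ∨ j = 1 := by omega
      rcases hj' with rfl|rfl
      · intro hmem; exact c0 (by simpa [pvPr] using hmem)
      · intro hmem; exact c1 (by simpa [pvPr] using hmem))
    have mk : "incompatible_runtime" ∈ N := by simpa using c2
    have m0 : ¬ "cuda_oom" ∈ N := by simpa using c0
    have m1 : ¬ "worker_crash" ∈ N := by simpa using c1
    rw [hm]
    simp [pvPriority, List.find?, mk, m0, m1, pvPr]
  by_cases c3 : N.contains "gated_model" = true
  · have hm := minmr_eq_of N 3 (by norm_num) (by norm_num) (by simpa using c3)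
      (by
      intro j hj0 hj
      have hj' : j = 0 ∨ j = 1 ∨ j = 2 := by omega
      rcases hj' with rfl|rfl|rfl
      · intro hmem; exact c0 (by simpa [pvPr] using hmem)
      · intro hmem; exact c1 (by simpa [pvPr] using hmem)
      · intro hmem; exact c2 (by simpa [pvPr] using hmem))
    have mk : "gated_model" ∈ N := by simpa using c3
    have m0 : ¬ "cuda_oom" ∈ N := by simpa using c0
    have m1 : ¬ "worker_crash" ∈ N := by simpa using c1
    have m2 : ¬ "incompatible_runtime" ∈ N := by simpa using c2
    rw [hm]
    simp [pvPriority, List.find?, mk, m0, m1, m2, pvPr]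
  by_cases c4 : N.contains "missing_cache" = true
  · have hm := minmr_eq_of N 4 (by norm_num) (by norm_num) (by simpa using c4)
      (by
      intro j hj0 hj
      have hj' : j = 0 ∨ j = 1 ∨ j = 2 ∨ j = 3 := by omega
      rcases hj' with rfl|rfl|rfl|rfl
      · intro hmem; exact c0 (by simpa [pvPr] using hmem)
      · intro hmem; exact c1 (by simpa [pvPr] using hmem)
      · intro hmem; exact c2 (by simpa [pvPr] using hmem)
      · intro hmem; exact c3 (by simpa [pvPr] using hmem))
    have mk : "missing_cache" ∈ N := by simpa using c4
    have m0 : ¬ "cuda_oom" ∈ N := by simpa using c0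
    have m1 : ¬ "worker_crash" ∈ N := by simpa using c1
    have m2 : ¬ "incompatible_runtime" ∈ N := by simpa using c2
    have m3 : ¬ "gated_model" ∈ N := by simpa using c3
    rw [hm]
    simp [pvPriority, List.find?, mk, m0, m1, m2, m3, pvPr]
  by_cases c5 : N.contains "cpu_fallback_timeout" = true
  · have hm := minmr_eq_of N 5 (by norm_num) (by norm_num) (by simpa using c5)
      (by
      intro j hj0 hj
      have hj' : j = 0 ∨ j = 1 ∨ j = 2 ∨ j = 3 ∨ j = 4 := by omega
      rcases hj' with rfl|rfl|rfl|rfl|rfl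
      · intro hmem; exact c0 (by simpa [pvPr] using hmem)
      · intro hmem; exact c1 (by simpa [pvPr] using hmem)
      · intro hmem; exact c2 (by simpa [pvPr] using hmem)
      · intro hmem; exact c3 (by simpa [pvPr] using hmem)
      · intro hmem; exact c4 (by simpa [pvPr] using hmem))
    have mk : "cpu_fallback_timeout" ∈ N := by simpa using c5
    have m0 : ¬ "cuda_oom" ∈ N := by simpa using c0
    have m1 : ¬ "worker_crash" ∈ N := by simpa using c1
    have m2 : ¬ "incompatible_runtime" ∈ N := by simpa using c2
    have m3 : ¬ "gated_model" ∈ N := by simpa using c3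
    have m4 : ¬ "missing_cache" ∈ N := by simpa using c4
    rw [hm]
    simp [pvPriority, List.find?, mk, m0, m1, m2, m3, m4, pvPr]
  by_cases c6 : N.contains "invalid_json" = true
  · have hm := minmr_eq_of N 6 (by norm_num) (by norm_num) (by simpa using c6)
      (by
      intro j hj0 hj
      have hj' : j = 0 ∨ j = 1 ∨ j = 2 ∨ j = 3 ∨ j = 4 ∨ j = 5 := by omega
      rcases hj' with rfl|rfl|rfl|rfl|rfl|rfl
      · intro hmem; exact c0 (by simpa [pvPr] using hmem)
      · intro hmem; exact c1 (by simpa [pvPr] using hmem)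
      · intro hmem; exact c2 (by simpa [pvPr] using hmem)
      · intro hmem; exact c3 (by simpa [pvPr] using hmem)
      · intro hmem; exact c4 (by simpa [pvPr] using hmem)
      · intro hmem; exact c5 (by simpa [pvPr] using hmem))
    have mk : "invalid_json" ∈ N := by simpa using c6
    have m0 : ¬ "cuda_oom" ∈ N := by simpa using c0
    have m1 : ¬ "worker_crash" ∈ N := by simpa using c1
    have m2 : ¬ "incompatible_runtime" ∈ N := by simpa using c2
    have m3 : ¬ "gated_model" ∈ N := by simpa using c3
    have m4 : ¬ "missing_cache" ∈ N := by simpa using c4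
    have m5 : ¬ "cpu_fallback_timeout" ∈ N := by simpa using c5
    rw [hm]
    simp [pvPriority, List.find?, mk, m0, m1, m2, m3, m4, m5, pvPr]
  by_cases c7 : N.contains "local_llm_error" = true
  · have hm := minmr_eq_of N 7 (by norm_num) (by norm_num) (by simpa using c7)
      (by
      intro j hj0 hj
      have hj' : j = 0 ∨ j = 1 ∨ j = 2 ∨ j = 3 ∨ j = 4 ∨ j = 5 ∨ j = 6 := by omega
      rcases hj' with rfl|rfl|rfl|rfl|rfl|rfl|rfl
      · intro hmem; exact c0 (by simpa [pvPr] using hmem)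
      · intro hmem; exact c1 (by simpa [pvPr] using hmem)
      · intro hmem; exact c2 (by simpa [pvPr] using hmem)
      · intro hmem; exact c3 (by simpa [pvPr] using hmem)
      · intro hmem; exact c4 (by simpa [pvPr] using hmem)
      · intro hmem; exact c5 (by simpa [pvPr] using hmem)
      · intro hmem; exact c6 (by simpa [pvPr] using hmem))
    have mk : "local_llm_error" ∈ N := by simpa using c7
    have m0 : ¬ "cuda_oom" ∈ N := by simpa using c0
    have m1 : ¬ "worker_crash" ∈ N := by simpa using c1
    have m2 : ¬ "incompatible_runtime" ∈ N := by simpa using c2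
    have m3 : ¬ "gated_model" ∈ N := by simpa using c3
    have m4 : ¬ "missing_cache" ∈ N := by simpa using c4
    have m5 : ¬ "cpu_fallback_timeout" ∈ N := by simpa using c5
    have m6 : ¬ "invalid_json" ∈ N := by simpa using c6
    rw [hm]
    simp [pvPriority, List.find?, mk, m0, m1, m2, m3, m4, m5, m6, pvPr]
  have hno : ∀ j : Int, 0 ≤ j → j < 8 → pvPr j ∉ N := by
    intro j hj0 hj
    have hj' : j = 0 ∨ j = 1 ∨ j = 2 ∨ j = 3 ∨ j = 4 ∨ j = 5 ∨ j = 6 ∨ j = 7 := by omega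
    rcases hj' with rfl|rfl|rfl|rfl|rfl|rfl|rfl|rfl
    · intro hmem; exact c0 (by simpa [pvPr] using hmem)
    · intro hmem; exact c1 (by simpa [pvPr] using hmem)
    · intro hmem; exact c2 (by simpa [pvPr] using hmem)
    · intro hmem; exact c3 (by simpa [pvPr] using hmem)
    · intro hmem; exact c4 (by simpa [pvPr] using hmem)
    · intro hmem; exact c5 (by simpa [pvPr] using hmem)
    · intro hmem; exact c6 (by simpa [pvPr] using hmem)
    · intro hmem; exact c7 (by simpa [pvPr] using hmem)
  have m0 : ¬ "cuda_oom" ∈ N := by simpa using c0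
  have m1 : ¬ "worker_crash" ∈ N := by simpa using c1
  have m2 : ¬ "incompatible_runtime" ∈ N := by simpa using c2
  have m3 : ¬ "gated_model" ∈ N := by simpa using c3
  have m4 : ¬ "missing_cache" ∈ N := by simpa using c4
  have m5 : ¬ "cpu_fallback_timeout" ∈ N := by simpa using c5
  have m6 : ¬ "invalid_json" ∈ N := by simpa using c6
  have m7 : ¬ "local_llm_error" ∈ N := by simpa using c7
  have hm := minmr_eq8_of N hno
  rw [hm]
  simp [pvPriority, List.find?, m0, m1, m2, m3, m4, m5, m6, m7]

-- ===== VERDICT (by name: the statement is the Claim_ definition above) =====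
theorem primary_error_type_py_spec : Claim_equal_primary_error_type_py := by
  intro ets _
  unfold Spec_primary_error_type_py primary_error_type_py primary_error_type_py_alt
  set N := (ets.map fun item => PySem.Str.strip item).filter (fun s => s ≠ "") with hN
  by_cases h : N = []
  · simp [h]
  · rw [if_neg h, if_neg h]
    rw [pvFold_eq N none 8 (by norm_num) (by omega), find_eq N]
    by_cases hm : pvMinMr N < 8
    · simp [hm]
    · simp [hm]
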